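-- pv_equiv track=rewrite | github.com/MarwanBit/Tri-1-Procedural-Programming-2019-2020 | assignments/concordence.py | sorting_concordence
-- ===== SOURCE A (Python) =====
-- def sorting_concordence(input_dictionary):
--     '''precondition: concordence dictionary is a concordence
--     postcondition: sorted in ascending and alphanumerical order'''
--     sorted_keys = sorted(input_dictionary.keys())
--     sorted_values = [input_dictionary[i] for i in sorted(input_dictionary.keys())]
--     input_list_of_tuples = zip(sorted_keys,sorted_values)
--     alphanumberically_sorted_input_list_of_tuples = sorted(input_list_of_tuples,key = lambda x:x[0], reverse=False)
--     alphanumerically_sorted_input_list_of_tuples = sorted(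
--         alphanumberically_sorted_input_list_of_tuples,
--         key= lambda x:x[1],
--         reverse=True
--         )
--     list_of_keys = [i[1] for i in alphanumerically_sorted_input_list_of_tuples]
--     return (alphanumerically_sorted_input_list_of_tuples, list_of_keys)
-- ===== SOURCE B (Python) =====
-- def sorting_concordence(input_dictionary):
--     items = []
--     for value in sorted(set(input_dictionary.values()), reverse=True):
--         for key in sorted(k for k, v in input_dictionary.items() if v == value):
--             items.append((key, value))
--     return (items, [p[1] for p in items])
-- ===== Notes on version B (the rewrite author's own statement) =====
-- stated objective: alternative
-- what changed: B groups by value instead of sorting tuples: it enumerates the distinct values in descending order and, for each value, emits that value's keys in ascending order, concatenating the blocks; A builds key/value lists and runs two stable whole-list sort passes.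
import Mathlib
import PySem

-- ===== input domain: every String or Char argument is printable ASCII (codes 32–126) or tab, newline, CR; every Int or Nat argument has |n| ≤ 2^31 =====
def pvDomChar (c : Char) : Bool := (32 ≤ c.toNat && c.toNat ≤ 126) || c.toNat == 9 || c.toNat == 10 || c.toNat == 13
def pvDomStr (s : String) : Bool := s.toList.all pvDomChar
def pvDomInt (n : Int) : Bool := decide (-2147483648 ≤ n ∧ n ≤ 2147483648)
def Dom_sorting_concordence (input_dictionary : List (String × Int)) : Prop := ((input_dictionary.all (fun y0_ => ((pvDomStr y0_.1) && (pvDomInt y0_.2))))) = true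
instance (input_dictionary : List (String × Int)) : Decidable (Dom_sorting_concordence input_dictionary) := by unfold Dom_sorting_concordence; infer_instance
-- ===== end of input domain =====

-- B replaces A's key-sort + value-lookup + two whole-list stable sort passes by a
-- group-by-value scan: distinct values in descending order, each value's keys in
-- ascending order, blocks concatenated. Equal return value, different algorithm.

-- ===== PORT A =====
def sorting_concordence (input_dictionary : List (String × Int)) : (List (String × Int)) × List Int :=
  let d := PySem.Dict.mk input_dictionary
  let sorted_keys := PySem.List.sorted (PySem.Dict.keys d) (fun k => k)
  -- input_dictionary[i]: i ranges over the dict's own keys, so the lookup never raises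
  -- (the .getD 0 default is never taken)
  let sorted_values := (PySem.List.sorted (PySem.Dict.keys d) (fun k => k)).map
    (fun i => (PySem.Dict.get? d i).getD 0)
  let input_list_of_tuples := sorted_keys.zip sorted_values
  let alphanumberically_sorted := PySem.List.sorted input_list_of_tuples (fun x => x.1) false
  let alphanumerically_sorted := PySem.List.sorted alphanumberically_sorted (fun x => x.2) true
  (alphanumerically_sorted, alphanumerically_sorted.map (fun i => i.2))

-- ===== PORT B =====
def sorting_concordence_alt (input_dictionary : List (String × Int)) : (List (String × Int)) × List Int :=
  let d := PySem.Dict.mk input_dictionary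
  let items := (PySem.List.sorted (PySem.Set.ofList (PySem.Dict.values d)) (fun v => v) true).foldl
    (fun acc value =>
      (PySem.List.sorted (((PySem.Dict.items d).filter (fun kv => kv.2 == value)).map Prod.fst)
          (fun k => k)).foldl
        (fun acc key => acc ++ [(key, value)]) acc) []
  (items, items.map (fun p => p.2))

-- ===== PRECONDITION & SPEC =====
-- Pre_ requires pairwise-distinct keys: the association list encodes the Python dict
-- argument, and a Python dict cannot hold duplicate keys.
def Pre_sorting_concordence (input_dictionary : List (String × Int)) : Prop :=
  (input_dictionary.map Prod.fst).Nodup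
instance (input_dictionary : List (String × Int)) : Decidable (Pre_sorting_concordence input_dictionary) := by unfold Pre_sorting_concordence; infer_instance

def pvWitness_sorting_concordence : (List (String × Int)) := [("b", 1), ("a", 2), ("c", 2)]

def Spec_sorting_concordence (input_dictionary : List (String × Int)) (out : (List (String × Int)) × List Int) : Prop := out = sorting_concordence_alt input_dictionary
instance (input_dictionary : List (String × Int)) (out : (List (String × Int)) × List Int) : Decidable (Spec_sorting_concordence input_dictionary out) := by unfold Spec_sorting_concordence; infer_instance

-- ===== CLAIM (what is proved, stated in full; the proofs are below) =====
def Claim_equal_sorting_concordence : Prop := ∀ (input_dictionary : List (String × Int)), Dom_sorting_concordence input_dictionary → Pre_sorting_concordence input_dictionary → Spec_sorting_concordence input_dictionary (sorting_concordence input_dictionary)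

-- ===== LEMMAS AND PROOFS =====

-- the (non-strict) order "value descending, key ascending" both results are sorted in
def pvRns (a b : String × Int) : Prop := b.2 ≤ a.2 ∧ (a.2 = b.2 → a.1 ≤ b.1)

-- the same order as an injective key into a linear order
def pvKey (p : String × Int) : Lex (Int × String) := toLex (-p.2, p.1)

lemma pvKey_injective : Function.Injective pvKey := by
  intro a b h
  have h' : ((-a.2, a.1) : Int × String) = (-b.2, b.1) := congrArg ofLex h
  have h1 : -a.2 = -b.2 := congrArg Prod.fst h'
  have h2 : a.1 = b.1 := congrArg Prod.snd h'
  exact Prod.ext h2 (by omega)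

lemma pvRns_iff (a b : String × Int) : pvRns a b ↔ pvKey a ≤ pvKey b := by
  simp only [pvRns, pvKey, Prod.Lex.toLex_le_toLex]
  constructor
  · rintro ⟨h1, h2⟩
    rcases lt_or_eq_of_le h1 with h | h
    · exact Or.inl (by omega)
    · exact Or.inr ⟨by omega, h2 h.symm⟩
  · rintro (h | ⟨h1, h2⟩)
    · exact ⟨by omega, fun he => absurd he (by omega)⟩
    · exact ⟨by omega, fun _ => h2⟩

lemma pvRns_trans {a b c : String × Int} (h1 : pvRns a b) (h2 : pvRns b c) : pvRns a c := by
  obtain ⟨hv1, hk1⟩ := h1; obtain ⟨hv2, hk2⟩ := h2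
  refine ⟨le_trans hv2 hv1, fun he => ?_⟩
  have hbe : a.2 = b.2 := by omega
  have hce : b.2 = c.2 := by omega
  exact le_trans (hk1 hbe) (hk2 hce)

lemma pvInsertBy_cons (bef : (String × Int) → (String × Int) → Bool) (x y : String × Int)
    (ys : List (String × Int)) :
    PySem.List.insertBy bef x (y :: ys) =
      if bef x y then x :: y :: ys else y :: PySem.List.insertBy bef x ys := rfl

-- one insertion step keeps the list pvRns-sorted
lemma pvInsertBy_ok (bef : (String × Int) → (String × Int) → Bool) (x : String × Int)
    (acc : List (String × Int)) (hp : acc.Pairwise pvRns)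
    (h1 : ∀ y ∈ acc, bef x y = false → pvRns y x)
    (h2 : ∀ y ∈ acc, bef x y = true → pvRns x y) :
    (PySem.List.insertBy bef x acc).Pairwise pvRns ∧
      (PySem.List.insertBy bef x acc).Perm (x :: acc) := by
  induction acc with
  | nil => exact ⟨List.pairwise_singleton _ _, List.Perm.refl _⟩
  | cons y ys ih =>
    rw [pvInsertBy_cons]
    rcases List.pairwise_cons.mp hp with ⟨hy, hys⟩
    by_cases hb : bef x y = true
    · rw [if_pos hb]
      have hxy : pvRns x y := h2 y (List.mem_cons_self ..) hb
      refine ⟨List.pairwise_cons.mpr ⟨?_, hp⟩, List.Perm.refl _⟩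
      intro z hz
      rcases List.mem_cons.mp hz with rfl | hz'
      · exact hxy
      · exact pvRns_trans hxy (hy z hz')
    · rw [if_neg hb]
      have hyx : pvRns y x := h1 y (List.mem_cons_self ..) (by simpa using hb)
      obtain ⟨ihp, ihperm⟩ := ih hys
        (fun z hz hbz => h1 z (List.mem_cons_of_mem _ hz) hbz)
        (fun z hz hbz => h2 z (List.mem_cons_of_mem _ hz) hbz)
      refine ⟨List.pairwise_cons.mpr ⟨?_, ihp⟩, ?_⟩
      · intro z hz
        rcases (PySem.List.mem_insertBy bef x z ys).mp hz with rfl | hz'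
        · exact hyx
        · exact hy z hz'
      · exact (ihperm.cons y).trans (List.Perm.swap x y ys)

-- A's comparator: the reverse=True value sort of the final pass
def pvBefA (a b : String × Int) : Bool := decide (b.2 < a.2)

-- A's final pass: starting from a list with strictly increasing keys, the stable
-- reverse value sort produces a pvRns-sorted permutation (ties broken by the
-- incoming key order)
lemma pvFoldA (l acc : List (String × Int)) (hp : acc.Pairwise pvRns)
    (hl : l.Pairwise (fun p q => p.1 < q.1))
    (hcross : ∀ p ∈ acc, ∀ q ∈ l, p.1 < q.1) :
    ((l.foldl (fun acc x => PySem.List.insertBy pvBefA x acc) acc).Pairwise pvRns) ∧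
      (l.foldl (fun acc x => PySem.List.insertBy pvBefA x acc) acc).Perm (acc ++ l) := by
  induction l generalizing acc with
  | nil => simpa using hp
  | cons x t ih =>
    rcases List.pairwise_cons.mp hl with ⟨hxt, ht⟩
    obtain ⟨hins, hperm⟩ := pvInsertBy_ok pvBefA x acc hp
      (by
        intro y hy hb
        simp only [pvBefA, decide_eq_false_iff_not] at hb
        exact ⟨not_lt.mp hb, fun _ =>
          le_of_lt (hcross y hy x (List.mem_cons_self ..))⟩)
      (by
        intro y _ hb
        simp only [pvBefA, decide_eq_true_eq] at hb
        exact ⟨le_of_lt hb, fun he => absurd he (by omega)⟩)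
    obtain ⟨hres, hresperm⟩ := ih _ hins ht
      (by
        intro p hpmem q hq
        rcases (PySem.List.mem_insertBy pvBefA x p acc).mp hpmem with rfl | hp'
        · exact hxt q hq
        · exact hcross p hp' q (List.mem_cons_of_mem _ hq))
    refine ⟨hres, hresperm.trans ((hperm.append_right t).trans ?_)⟩
    rw [List.cons_append]
    exact List.perm_middle.symm

-- first-match lookup in a duplicate-free dict returns the stored value
lemma pvLookup : ∀ (input : List (String × Int)), (input.map Prod.fst).Nodup →
    ∀ p ∈ input, (PySem.Dict.get? (PySem.Dict.mk input) p.1) = some p.2 := by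
  intro input
  induction input with
  | nil => intro _ p hp; cases hp
  | cons q rest ih =>
    intro hnd p hp
    rw [List.map_cons, List.nodup_cons] at hnd
    obtain ⟨hq, hrest⟩ := hnd
    rcases List.mem_cons.mp hp with rfl | hp'
    · rw [PySem.Dict.get?_mk_cons]; simp
    · have hne : (q.1 == p.1) = false := by
        simp only [beq_eq_false_iff_ne, ne_eq]
        intro he
        exact hq (he ▸ List.mem_map_of_mem hp')
      rw [PySem.Dict.get?_mk_cons, hne]
      simpa using ih hrest p hp'

-- ONE block of B: the keys of value v, sorted ascending, re-paired with v
def pvF (input : List (String × Int)) (v : Int) : List (String × Int) :=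
  (PySem.List.sorted ((input.filter (fun kv => kv.2 == v)).map Prod.fst) (fun k => k)).map
    (fun k => (k, v))

lemma pvF_snd (input : List (String × Int)) (v : Int) :
    ∀ p ∈ pvF input v, p.2 = v := by
  intro p hp
  rcases List.mem_map.mp hp with ⟨k, _, rfl⟩
  rfl

lemma pvF_perm (input : List (String × Int)) (v : Int) :
    (pvF input v).Perm (input.filter (fun kv => kv.2 == v)) := by
  have h1 := (PySem.List.sorted_perm ((input.filter (fun kv => kv.2 == v)).map Prod.fst)
    (fun k => k) false).map (fun k => (k, v))
  have h2 : ((input.filter (fun kv => kv.2 == v)).map Prod.fst).map (fun k => (k, v))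
      = input.filter (fun kv => kv.2 == v) := by
    rw [List.map_map]
    rw [List.map_congr_left (g := id), List.map_id]
    intro p hp
    have hv : p.2 = v := by
      have := List.of_mem_filter hp
      simpa using this
    simp only [Function.comp_apply, id_eq]
    exact Prod.ext rfl hv.symm
  rw [h2] at h1
  exact h1

lemma pvF_pairwise (input : List (String × Int)) (v : Int) :
    (pvF input v).Pairwise pvRns := by
  refine List.pairwise_map.mpr ?_
  have h := PySem.List.sorted_pairwise ((input.filter (fun kv => kv.2 == v)).map Prod.fst)
    (fun k => k)
  exact h.imp (fun hk => ⟨le_refl v, fun _ => hk⟩)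

-- blocks of strictly decreasing values concatenate to a pvRns-sorted list
lemma pvBlocks_pairwise (input : List (String × Int)) :
    ∀ vs : List Int, vs.Pairwise (fun a b => b < a) →
      (vs.flatMap (pvF input)).Pairwise pvRns := by
  intro vs
  induction vs with
  | nil => intro _; simp
  | cons v t ih =>
    intro hp
    rcases List.pairwise_cons.mp hp with ⟨hv, ht⟩
    rw [List.flatMap_cons]
    refine List.pairwise_append.mpr ⟨pvF_pairwise input v, ih ht, ?_⟩
    intro x hx y hy
    rcases List.mem_flatMap.mp hy with ⟨w, hw, hyw⟩
    have hxv : x.2 = v := pvF_snd input v x hx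
    have hyw2 : y.2 = w := pvF_snd input w y hyw
    exact ⟨by rw [hxv, hyw2]; exact le_of_lt (hv w hw), by
      intro he; exact absurd (hxv ▸ hyw2 ▸ he.symm) (ne_of_lt (hv w hw))⟩

-- filtering by each of a duplicate-free covering list of values and concatenating
-- is a permutation of the original list
lemma pvBlocks_perm : ∀ (vs : List Int) (input : List (String × Int)), vs.Nodup →
    (∀ p ∈ input, p.2 ∈ vs) →
      (vs.flatMap (fun v => input.filter (fun kv => kv.2 == v))).Perm input := by
  intro vs
  induction vs with
  | nil =>
    intro input _ hcov
    cases input with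
    | nil => simp
    | cons p t => exact absurd (hcov p (List.mem_cons_self ..)) (by simp)
  | cons v t ih =>
    intro input hnd hcov
    rcases List.nodup_cons.mp hnd with ⟨hv, hnt⟩
    rw [List.flatMap_cons]
    have hrest : ∀ w ∈ t, input.filter (fun kv => kv.2 == w)
        = (input.filter (fun kv => !(kv.2 == v))).filter (fun kv => kv.2 == w) := by
      intro w hw
      rw [List.filter_filter]
      refine (List.filter_congr ?_).symm
      intro kv _
      by_cases he : kv.2 = w
      · have hwv : ¬ w = v := fun hh => hv (hh ▸ hw)
        simp [he, hwv]
      · simp [he]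
    have ht : (t.flatMap (fun w => input.filter (fun kv => kv.2 == w))).Perm
        (input.filter (fun kv => !(kv.2 == v))) := by
      have := ih (input.filter (fun kv => !(kv.2 == v))) hnt ?_
      · rw [List.flatMap_congr hrest]
        exact this
      · intro p hp
        have hmem := List.mem_of_mem_filter hp
        have hne : ¬ (p.2 == v) = true := by
          have := List.of_mem_filter hp
          simpa using this
        rcases List.mem_cons.mp (hcov p hmem) with he | hti
        · exact absurd (by simp [he]) hne
        · exact hti
    exact ((List.Perm.refl _).append ht).trans (List.filter_append_perm _ input)

lemma pvFlatMap_congr_perm (vs : List Int) (F G : Int → List (String × Int))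
    (h : ∀ v ∈ vs, (F v).Perm (G v)) : (vs.flatMap F).Perm (vs.flatMap G) := by
  induction vs with
  | nil => simp
  | cons v t ih =>
    rw [List.flatMap_cons, List.flatMap_cons]
    exact (h v (List.mem_cons_self ..)).append
      (ih (fun w hw => h w (List.mem_cons_of_mem _ hw)))

-- B's distinct-value list, descending
def pvVals (input : List (String × Int)) : List Int :=
  PySem.List.sorted (PySem.Set.ofList (input.map Prod.snd)) (fun v => v) true

lemma pvVals_pairwise (input : List (String × Int)) :
    (pvVals input).Pairwise (fun a b => b < a) := by
  have hle := PySem.List.sorted_pairwise_rev (PySem.Set.ofList (input.map Prod.snd)) (fun v => v)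
  have hnd : (pvVals input).Nodup :=
    ((PySem.List.sorted_perm _ _ _).nodup_iff).mpr (PySem.Set.nodup_ofList _)
  exact (hle.and hnd).imp (fun h => lt_of_le_of_ne h.1 (Ne.symm h.2))

lemma pvVals_cover (input : List (String × Int)) :
    ∀ p ∈ input, p.2 ∈ pvVals input := by
  intro p hp
  rw [pvVals, PySem.List.mem_sorted, PySem.Set.mem_ofList]
  exact List.mem_map_of_mem hp

-- B's items list, written as a flatMap over the blocks
lemma pvB_eq (input : List (String × Int)) :
    sorting_concordence_alt input = ((pvVals input).flatMap (pvF input),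
      ((pvVals input).flatMap (pvF input)).map (fun p => p.2)) := by
  have houter : ∀ (vs : List Int) (acc : List (String × Int)),
      vs.foldl (fun acc value =>
        (PySem.List.sorted ((input.filter (fun kv => kv.2 == value)).map Prod.fst)
            (fun k => k)).foldl (fun acc key => acc ++ [(key, value)]) acc) acc
        = acc ++ vs.flatMap (pvF input) := by
    intro vs
    induction vs with
    | nil => intro acc; simp
    | cons v t iht =>
      intro acc
      rw [List.foldl_cons, iht, PySem.List.foldl_append_singleton_eq_map, List.flatMap_cons,
        List.append_assoc]
      rfl
  show (let d := PySem.Dict.mk input; _ : (List (String × Int)) × List Int) = _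
  simpa [sorting_concordence_alt, pvVals, pvF] using congrArg
    (fun L => (L, L.map (fun p : String × Int => p.2))) (houter (pvVals input) [])

-- ===== VERDICT (by name: the statement is the Claim_ definition above) =====
theorem sorting_concordence_spec : Claim_equal_sorting_concordence := by
  intro input hdom hpre
  unfold Spec_sorting_concordence
  have hpre' : (input.map Prod.fst).Nodup := hpre
  -- B's list is a pvRns-sorted permutation of the items
  have hBp : ((pvVals input).flatMap (pvF input)).Pairwise pvRns :=
    pvBlocks_pairwise input (pvVals input) (pvVals_pairwise input)
  have hBperm : ((pvVals input).flatMap (pvF input)).Perm input :=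
    (pvFlatMap_congr_perm (pvVals input) _ _ (fun v _ => pvF_perm input v)).trans
      (pvBlocks_perm (pvVals input) input
        ((PySem.List.sorted_perm _ _ _).nodup_iff.mpr (PySem.Set.nodup_ofList _))
        (pvVals_cover input))
  -- abbreviations for A's intermediate values
  set d := PySem.Dict.mk input with hd
  have hkeys : PySem.Dict.keys d = input.map Prod.fst := rfl
  set sk := PySem.List.sorted (PySem.Dict.keys d) (fun k => k) with hsk
  set f : String → String × Int := fun i => (i, (PySem.Dict.get? d i).getD 0) with hf
  have hskperm : sk.Perm (input.map Prod.fst) := by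
    rw [hsk, hkeys]; exact PySem.List.sorted_perm _ _ _
  have hle : sk.Pairwise (fun a b => a ≤ b) := by
    rw [hsk]; exact PySem.List.sorted_pairwise _ _
  have hnd : sk.Nodup := hskperm.nodup_iff.mpr hpre'
  have hlt : sk.Pairwise (fun a b => a < b) :=
    (hle.and hnd).imp (fun h => lt_of_le_of_ne h.1 h.2)
  -- the zip of the sorted keys with their values is a map over the sorted keys
  have hzip : sk.zip (sk.map (fun i => (PySem.Dict.get? d i).getD 0)) = sk.map f := by
    clear hskperm hle hnd hlt hsk
    induction sk with
    | nil => rfl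
    | cons a t ihz => simp only [List.map_cons, List.zip_cons_cons, ihz, hf]
  -- the first (key-ascending) sort leaves that list unchanged
  have hs1 : PySem.List.sorted (sk.map f) (fun x => x.1) false = sk.map f :=
    PySem.List.sorted_eq_self_of_pairwise _ _ (List.pairwise_map.mpr hle)
  -- A's final pass, as an insertion fold over a strictly key-increasing list
  have hAfold := pvFoldA (sk.map f) [] List.Pairwise.nil
    (List.pairwise_map.mpr hlt) (by intro p hp; cases hp)
  obtain ⟨hAp, hApermL⟩ := hAfold
  have hArew : PySem.List.sorted (sk.map f) (fun x => x.2) true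
      = (sk.map f).foldl (fun acc x => PySem.List.insertBy pvBefA x acc) [] := by
    rw [PySem.List.sorted_rev_eq_foldl_insertBy]; rfl
  -- the map over the sorted keys is a permutation of the input items
  have hmapeq : (input.map Prod.fst).map f = input := by
    rw [List.map_map]
    rw [List.map_congr_left (g := id) ?_, List.map_id]
    intro p hp
    have hv := pvLookup input hpre' p hp
    rw [← hd] at hv
    simp only [Function.comp_apply, hf, id, hv, Option.getD_some]
  have hApermInput : ((sk.map f).foldl (fun acc x => PySem.List.insertBy pvBefA x acc) []).Perm input := by
    refine hApermL.trans ?_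
    have h1 : (List.map f sk).Perm input := by
      have h2 := hskperm.map f
      rwa [hmapeq] at h2
    simpa using h1
  -- the two sorted lists coincide
  have hfinal : (sk.map f).foldl (fun acc x => PySem.List.insertBy pvBefA x acc) []
      = (pvVals input).flatMap (pvF input) :=
    PySem.List.eq_of_perm_of_pairwise_le_of_injective pvKey pvKey_injective
      (hApermInput.trans hBperm.symm)
      (hAp.imp (fun h => (pvRns_iff _ _).mp h))
      (hBp.imp (fun h => (pvRns_iff _ _).mp h))
  -- assemble the two return pairs
  show sorting_concordence input = sorting_concordence_alt input
  rw [pvB_eq]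
  unfold sorting_concordence
  simp only [← hd, ← hsk, hzip, hs1, hArew, hfinal]
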